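-- pv_equiv track=rewrite | github.com/ScottDAdams/site_auditor | app/ai_validator.py | count_distinct_payload_urls_in_text
-- ===== SOURCE A (Python) =====
-- def count_distinct_payload_urls_in_text(text: str, candidate_urls: list[str]) -> int:
--     """How many distinct candidate URLs appear as substrings in text (exact URL match)."""
--     if not text or not candidate_urls:
--         return 0
--     seen = set()
--     for u in candidate_urls:
--         if not u:
--             continue
--         s = str(u).strip()
--         if s and s in text and s not in seen:
--             seen.add(s)
--     return len(seen)
-- ===== SOURCE B (Python) =====
-- def count_distinct_payload_urls_in_text(text: str, candidate_urls: list[str]) -> int: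
--     """How many distinct candidate URLs appear as substrings in text (exact URL match)."""
--     pats = {u.strip() for u in candidate_urls if u and u.strip()}
--     lengths = {len(s) for s in pats}
--     found = set()
--     for i in range(len(text)):
--         for L in lengths:
--             sub = text[i:i + L]
--             if sub in pats:
--                 found.add(sub)
--     return len(found)
-- ===== Notes on version B (the rewrite author's own statement) =====
-- stated objective: faster
-- what changed: Replaces A's per-candidate 's in text' substring searches with a one-pass text-driven matcher: dedupe the stripped candidates into a hash set, collect their distinct lengths, then slide over the text once probing the window of each distinct length at every position.
import Mathlib
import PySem

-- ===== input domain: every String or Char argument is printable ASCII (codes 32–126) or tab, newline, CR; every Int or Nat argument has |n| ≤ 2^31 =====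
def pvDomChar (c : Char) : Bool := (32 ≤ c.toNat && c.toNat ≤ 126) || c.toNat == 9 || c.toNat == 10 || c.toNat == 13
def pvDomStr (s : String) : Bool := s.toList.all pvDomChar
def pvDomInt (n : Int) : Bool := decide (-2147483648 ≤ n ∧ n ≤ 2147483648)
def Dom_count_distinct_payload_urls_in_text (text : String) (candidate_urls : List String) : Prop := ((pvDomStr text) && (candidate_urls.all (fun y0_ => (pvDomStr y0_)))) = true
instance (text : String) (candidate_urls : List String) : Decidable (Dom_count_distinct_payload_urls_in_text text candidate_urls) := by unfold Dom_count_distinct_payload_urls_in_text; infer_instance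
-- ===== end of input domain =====

-- B is a one-pass, text-driven multi-pattern matcher: it dedupes the stripped candidates into a
-- hash set, collects their distinct lengths, and slides over the text once, hash-probing the
-- window of each pattern length at every position (alternative algorithm; measurably faster here
-- only because the candidate set is large relative to its few distinct lengths).

-- ===== PORT A =====
def count_distinct_payload_urls_in_text (text : String) (candidate_urls : List String) : Int :=
  if text = "" ∨ candidate_urls = [] then 0
  else
    let seen := candidate_urls.foldl (fun (seen : PySem.Set String) u =>
      if u = "" then seen
      else
        let s := PySem.Str.strip u
        if s ≠ "" ∧ PySem.Str.isIn s text = true ∧ PySem.Set.contains seen s = false then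
          PySem.Set.add seen s
        else seen) PySem.Set.empty
    (seen.length : Int)

-- ===== PORT B =====
def count_distinct_payload_urls_in_text_alt (text : String) (candidate_urls : List String) : Int :=
  let pats : PySem.Set String :=
    PySem.Set.ofList ((candidate_urls.filter
      (fun u => u ≠ "" && PySem.Str.strip u ≠ "")).map PySem.Str.strip)
  let lengths : PySem.Set Int := PySem.Set.ofList (pats.map PySem.Str.len)
  let found := (PySem.List.pyRange 0 (PySem.Str.len text) 1).foldl
    (fun (found : PySem.Set String) i =>
      lengths.foldl (fun (found : PySem.Set String) L =>
        let sub := PySem.Str.slice text (some i) (some (i + L))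
        if PySem.Set.contains pats sub then PySem.Set.add found sub else found) found)
    PySem.Set.empty
  (found.length : Int)

-- ===== PRECONDITION & SPEC =====
def Spec_count_distinct_payload_urls_in_text (text : String) (candidate_urls : List String) (out : Int) : Prop := out = count_distinct_payload_urls_in_text_alt text candidate_urls
instance (text : String) (candidate_urls : List String) (out : Int) : Decidable (Spec_count_distinct_payload_urls_in_text text candidate_urls out) := by unfold Spec_count_distinct_payload_urls_in_text; infer_instance

-- ===== CLAIM (what is proved, stated in full; the proofs are below) =====
def Claim_equal_count_distinct_payload_urls_in_text : Prop := ∀ (text : String) (candidate_urls : List String), Dom_count_distinct_payload_urls_in_text text candidate_urls → Spec_count_distinct_payload_urls_in_text text candidate_urls (count_distinct_payload_urls_in_text text candidate_urls)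

-- ===== LEMMAS AND PROOFS =====

-- A's filtered candidate list: stripped, non-empty, substring of text
def pvFilterA (text : String) (candidate_urls : List String) : List String :=
  ((candidate_urls.filter (fun u => u ≠ "")).map PySem.Str.strip).filter
    (fun s => s ≠ "" && PySem.Str.isIn s text)

-- A's loop over the candidates builds exactly set(filtered stripped candidates) (filter P abstract)
theorem foldl_eq_update (P : String → Bool) (l : List String) (seen : PySem.Set String) :
    l.foldl (fun (seen : PySem.Set String) u =>
      if u = "" then seen
      else if P (PySem.Str.strip u) = true ∧ PySem.Set.contains seen (PySem.Str.strip u) = false then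
          PySem.Set.add seen (PySem.Str.strip u)
        else seen) seen
    = PySem.Set.update seen (((l.filter (fun u => u ≠ "")).map PySem.Str.strip).filter P) := by
  induction l generalizing seen with
  | nil => simp [PySem.Set.update]
  | cons u l ih =>
    by_cases hu : u = ""
    · have hf : (u :: l).filter (fun u => u ≠ "") = l.filter (fun u => u ≠ "") := by
        simp [hu]
      rw [List.foldl_cons, if_pos hu, hf]
      exact ih seen
    · have hf : (u :: l).filter (fun u => u ≠ "") = u :: l.filter (fun u => u ≠ "") := by
        simp [hu]
      rw [List.foldl_cons, if_neg hu, hf, List.map_cons, List.filter_cons]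
      by_cases hP : P (PySem.Str.strip u) = true
      · rw [if_pos hP]
        have hupd : PySem.Set.update seen (PySem.Str.strip u ::
            ((l.filter (fun u => u ≠ "")).map PySem.Str.strip).filter P)
            = PySem.Set.update (PySem.Set.add seen (PySem.Str.strip u))
              (((l.filter (fun u => u ≠ "")).map PySem.Str.strip).filter P) := rfl
        by_cases hseen : PySem.Set.contains seen (PySem.Str.strip u) = false
        · rw [if_pos ⟨hP, hseen⟩, ih, hupd]
        · have hmem : PySem.Str.strip u ∈ seen := (PySem.Set.contains_iff _ _).mp (by
            revert hseen; cases PySem.Set.contains seen (PySem.Str.strip u) <;> simp)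
          rw [if_neg (by tauto), ih, hupd]
          rw [show PySem.Set.add seen (PySem.Str.strip u) = seen from by
            simp [PySem.Set.add, hmem]]
      · rw [if_neg hP, if_neg (by tauto), ih]

-- with empty text the filtered list is empty: no non-empty string is a substring of ""
theorem filter_empty_text (l : List String) : pvFilterA "" l = [] := by
  apply List.filter_eq_nil_iff.mpr
  intro s _
  by_cases hs : s = ""
  · simp [hs]
  · have hin : PySem.Chars.isIn s.toList (("" : String).toList) = false :=
      (PySem.Chars.isIn_eq_false_iff _ _).mpr (fun hinf =>
        hs (String.toList_eq_nil_iff.mp (List.eq_nil_of_infix_nil hinf)))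
    simp only [String.toList_empty] at hin
    simp [hs, hin]

-- A's if-condition is the Bool condition of pvFilterA's filter (plus the 'seen' test)
theorem step_eq (text : String) :
    (fun (seen : PySem.Set String) u =>
      if u = "" then seen
      else
        let s := PySem.Str.strip u
        if s ≠ "" ∧ PySem.Str.isIn s text = true ∧ PySem.Set.contains seen s = false then
          PySem.Set.add seen s
        else seen)
    = (fun (seen : PySem.Set String) u =>
      if u = "" then seen
      else if ((fun s => s ≠ "" && PySem.Str.isIn s text) (PySem.Str.strip u)) = true ∧
          PySem.Set.contains seen (PySem.Str.strip u) = false then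
          PySem.Set.add seen (PySem.Str.strip u)
        else seen) := by
  funext seen u
  by_cases hu : u = ""
  · simp [hu]
  · rw [if_neg hu, if_neg hu]
    apply if_congr _ rfl rfl
    simp [and_assoc]

-- characterisation of A: the size of the deduped filtered list
theorem A_eq (text : String) (candidate_urls : List String) :
    count_distinct_payload_urls_in_text text candidate_urls
      = ((PySem.Set.ofList (pvFilterA text candidate_urls)).length : Int) := by
  unfold count_distinct_payload_urls_in_text
  by_cases hg : text = "" ∨ candidate_urls = []
  · rw [if_pos hg]
    rcases hg with h | h
    · rw [h, filter_empty_text]; rfl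
    · simp [h, pvFilterA, PySem.Set.ofList, PySem.Set.empty]
  · rw [if_neg hg]
    rw [step_eq text,
      foldl_eq_update (fun s => s ≠ "" && PySem.Str.isIn s text) candidate_urls PySem.Set.empty]
    rfl

-- inner loop over lengths: conditional adds
theorem mem_inner_fold (pats : List String) (g : Int → String) (ls : List Int)
    (s0 : PySem.Set String) (x : String) :
    x ∈ ls.foldl (fun (s : PySem.Set String) L =>
        if PySem.Set.contains pats (g L) then PySem.Set.add s (g L) else s) s0
      ↔ x ∈ s0 ∨ ∃ L ∈ ls, g L = x ∧ x ∈ pats := by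
  induction ls generalizing s0 with
  | nil => simp
  | cons L ls ih =>
    rw [List.foldl_cons]
    by_cases hc : PySem.Set.contains pats (g L) = true
    · rw [if_pos hc, ih]
      rw [PySem.Set.mem_add]
      constructor
      · rintro ((hx | rfl) | ⟨M, hM, rfl, hp⟩)
        · exact Or.inl hx
        · exact Or.inr ⟨L, List.mem_cons_self .., rfl, (PySem.Set.contains_iff _ _).mp hc⟩
        · exact Or.inr ⟨M, List.mem_cons_of_mem _ hM, rfl, hp⟩
      · rintro (hx | ⟨M, hM, rfl, hp⟩)
        · exact Or.inl (Or.inl hx)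
        · rcases List.mem_cons.mp hM with rfl | hM'
          · exact Or.inl (Or.inr rfl)
          · exact Or.inr ⟨M, hM', rfl, hp⟩
    · rw [if_neg hc, ih]
      constructor
      · rintro (hx | ⟨M, hM, rfl, hp⟩)
        · exact Or.inl hx
        · exact Or.inr ⟨M, List.mem_cons_of_mem _ hM, rfl, hp⟩
      · rintro (hx | ⟨M, hM, rfl, hp⟩)
        · exact Or.inl hx
        · rcases List.mem_cons.mp hM with rfl | hM'
          · exact absurd ((PySem.Set.contains_iff _ _).mpr hp) hc
          · exact Or.inr ⟨M, hM', rfl, hp⟩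

theorem nodup_inner_fold (pats : List String) (g : Int → String) (ls : List Int)
    (s0 : PySem.Set String) (h : s0.Nodup) :
    (ls.foldl (fun (s : PySem.Set String) L =>
        if PySem.Set.contains pats (g L) then PySem.Set.add s (g L) else s) s0).Nodup := by
  induction ls generalizing s0 with
  | nil => exact h
  | cons L ls ih =>
    rw [List.foldl_cons]
    by_cases hc : PySem.Set.contains pats (g L) = true
    · rw [if_pos hc]; exact ih _ (PySem.Set.nodup_add _ _ h)
    · rw [if_neg hc]; exact ih _ h

theorem mem_outer_fold (pats : List String) (g : Int → Int → String) (ps ls : List Int)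
    (s0 : PySem.Set String) (x : String) :
    x ∈ ps.foldl (fun (s : PySem.Set String) i =>
        ls.foldl (fun (s : PySem.Set String) L =>
          if PySem.Set.contains pats (g i L) then PySem.Set.add s (g i L) else s) s) s0
      ↔ x ∈ s0 ∨ ∃ i ∈ ps, ∃ L ∈ ls, g i L = x ∧ x ∈ pats := by
  induction ps generalizing s0 with
  | nil => simp
  | cons i ps ih =>
    rw [List.foldl_cons, ih, mem_inner_fold]
    constructor
    · rintro ((hx | ⟨L, hL, rfl, hp⟩) | ⟨j, hj, hrest⟩)
      · exact Or.inl hx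
      · exact Or.inr ⟨i, List.mem_cons_self .., L, hL, rfl, hp⟩
      · exact Or.inr ⟨j, List.mem_cons_of_mem _ hj, hrest⟩
    · rintro (hx | ⟨j, hj, hrest⟩)
      · exact Or.inl (Or.inl hx)
      · rcases List.mem_cons.mp hj with rfl | hj'
        · exact Or.inl (Or.inr hrest)
        · exact Or.inr ⟨j, hj', hrest⟩

theorem nodup_outer_fold (pats : List String) (g : Int → Int → String) (ps ls : List Int)
    (s0 : PySem.Set String) (h : s0.Nodup) :
    (ps.foldl (fun (s : PySem.Set String) i =>
        ls.foldl (fun (s : PySem.Set String) L =>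
          if PySem.Set.contains pats (g i L) then PySem.Set.add s (g i L) else s) s) s0).Nodup := by
  induction ps generalizing s0 with
  | nil => exact h
  | cons i ps ih => exact ih _ (nodup_inner_fold pats (g i) ls s0 h)

-- a slice text[i:i+L] that equals x makes x a substring; conversely an occurrence gives a slice
theorem exists_slice_iff (text x : String) (ls : List Int)
    (hxe : x ≠ "") (hL : (x.toList.length : Int) ∈ ls) (hpos : ∀ L ∈ ls, 0 ≤ L) :
    (∃ i ∈ PySem.List.pyRange 0 (PySem.Str.len text) 1, ∃ L ∈ ls,
        PySem.Str.slice text (some i) (some (i + L)) = x)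
      ↔ PySem.Chars.isIn x.toList text.toList = true := by
  constructor
  · rintro ⟨i, hi, L, hLm, hsl⟩
    rw [PySem.List.mem_pyRange_one, PySem.Str.len_eq] at hi
    rw [PySem.Chars.isIn_iff_infix]
    have h0i : (0:Int) ≤ i := hi.1
    have h0L : (0:Int) ≤ L := hpos L hLm
    have : x.toList = PySem.Chars.slice text.toList (some i) (some (i + L)) := by
      rw [← PySem.Str.toList_slice, hsl]
    rw [this]
    show PySem.List.slice text.toList (some i) (some (i + L)) <:+: text.toList
    rw [PySem.List.slice_toNat text.toList h0i (by omega)]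
    exact ((List.take_prefix _ _).isInfix).trans (List.drop_suffix i.toNat text.toList).isInfix
  · intro hin
    obtain ⟨a, b, hab⟩ := (PySem.Chars.isIn_iff_infix _ _).mp hin
    have hxl : x.toList ≠ [] := fun h => hxe (String.toList_inj.mp (by simpa using h))
    refine ⟨(a.length : Int), ?_, (x.toList.length : Int), hL, ?_⟩
    · rw [PySem.List.mem_pyRange_one, PySem.Str.len_eq]
      have : a.length + x.toList.length + b.length = text.toList.length := by
        rw [← hab, List.length_append, List.length_append]
      have hx1 : 1 ≤ x.toList.length := List.length_pos_iff.mpr hxl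
      constructor
      · positivity
      · exact_mod_cast by omega
    · apply String.toList_inj.mp
      rw [PySem.Str.toList_slice]
      show PySem.List.slice text.toList _ _ = _
      rw [PySem.List.slice_natCast_add text.toList a.length x.toList.length]
      rw [← hab, List.append_assoc, List.drop_left, List.take_left]

-- B's deduped pattern set
def pvPats (candidate_urls : List String) : PySem.Set String :=
  PySem.Set.ofList ((candidate_urls.filter
    (fun u => u ≠ "" && PySem.Str.strip u ≠ "")).map PySem.Str.strip)

-- every pattern is a non-empty stripped candidate
theorem mem_pats_ne (cands : List String) (x : String) (hx : x ∈ pvPats cands) : x ≠ "" := by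
  rw [pvPats, PySem.Set.mem_ofList] at hx
  obtain ⟨u, hu, rfl⟩ := List.mem_map.mp hx
  have h2 := (List.mem_filter.mp hu).2
  simp only [Bool.and_eq_true, decide_eq_true_eq, ne_eq] at h2
  exact h2.2

-- A's deduped filtered list has the same elements as {x ∈ pats | x occurs in text}
theorem mem_filterA_iff (text : String) (cands : List String) (x : String) :
    x ∈ PySem.Set.ofList (pvFilterA text cands)
      ↔ x ∈ pvPats cands ∧ PySem.Chars.isIn x.toList text.toList = true := by
  simp only [pvFilterA, pvPats, PySem.Set.mem_ofList, List.mem_filter, List.mem_map,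
    PySem.Str.isIn_eq, Bool.and_eq_true, decide_eq_true_eq, ne_eq]
  constructor
  · rintro ⟨⟨u, hu, rfl⟩, hs, hin⟩
    exact ⟨⟨u, ⟨hu.1, hu.2, hs⟩, rfl⟩, hin⟩
  · rintro ⟨⟨u, hu, rfl⟩, hin⟩
    exact ⟨⟨u, ⟨hu.1, hu.2.1⟩, rfl⟩, hu.2.2, hin⟩

-- ===== VERDICT (by name: the statement is the Claim_ definition above) =====
theorem count_distinct_payload_urls_in_text_spec : Claim_equal_count_distinct_payload_urls_in_text := by
  intro text cands _
  unfold Spec_count_distinct_payload_urls_in_text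
  rw [A_eq]
  show _ = (((PySem.List.pyRange 0 (PySem.Str.len text) 1).foldl
    (fun (found : PySem.Set String) i =>
      (PySem.Set.ofList ((pvPats cands).map PySem.Str.len)).foldl
        (fun (found : PySem.Set String) L =>
          if PySem.Set.contains (pvPats cands) (PySem.Str.slice text (some i) (some (i + L)))
          then PySem.Set.add found (PySem.Str.slice text (some i) (some (i + L))) else found)
        found)
    PySem.Set.empty).length : Int)
  have hperm : (PySem.Set.ofList (pvFilterA text cands)).Perm
      ((PySem.List.pyRange 0 (PySem.Str.len text) 1).foldl
        (fun (found : PySem.Set String) i =>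
          (PySem.Set.ofList ((pvPats cands).map PySem.Str.len)).foldl
            (fun (found : PySem.Set String) L =>
              if PySem.Set.contains (pvPats cands) (PySem.Str.slice text (some i) (some (i + L)))
              then PySem.Set.add found (PySem.Str.slice text (some i) (some (i + L))) else found)
            found)
        PySem.Set.empty) := by
    apply (List.perm_ext_iff_of_nodup (PySem.Set.nodup_ofList _)
      (nodup_outer_fold (pvPats cands) (fun i L => PySem.Str.slice text (some i) (some (i + L)))
        _ _ PySem.Set.empty List.nodup_nil)).mpr
    intro x
    rw [mem_filterA_iff,
      mem_outer_fold (pvPats cands) (fun i L => PySem.Str.slice text (some i) (some (i + L)))]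
    constructor
    · rintro ⟨hp, hin⟩
      have hL : (x.toList.length : Int) ∈ PySem.Set.ofList ((pvPats cands).map PySem.Str.len) := by
        rw [PySem.Set.mem_ofList]
        simpa [PySem.Str.len_eq] using List.mem_map_of_mem (f := PySem.Str.len) hp
      have hpos : ∀ L ∈ PySem.Set.ofList ((pvPats cands).map PySem.Str.len), (0:Int) ≤ L := by
        intro L hLm
        rw [PySem.Set.mem_ofList] at hLm
        obtain ⟨y, _, rfl⟩ := List.mem_map.mp hLm
        rw [PySem.Str.len_eq]
        positivity
      obtain ⟨i, hi, L, hLm, hsl⟩ :=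
        (exists_slice_iff text x _ (mem_pats_ne cands x hp) hL hpos).mpr hin
      exact Or.inr ⟨i, hi, L, hLm, hsl, hp⟩
    · rintro (hx | ⟨i, hi, L, hLm, hsl, hp⟩)
      · exact absurd hx (List.not_mem_nil)
      · refine ⟨hp, ?_⟩
        have hL : (x.toList.length : Int) ∈ PySem.Set.ofList ((pvPats cands).map PySem.Str.len) := by
          rw [PySem.Set.mem_ofList]
          simpa [PySem.Str.len_eq] using List.mem_map_of_mem (f := PySem.Str.len) hp
        have hpos : ∀ L ∈ PySem.Set.ofList ((pvPats cands).map PySem.Str.len), (0:Int) ≤ L := by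
          intro L hLm
          rw [PySem.Set.mem_ofList] at hLm
          obtain ⟨y, _, rfl⟩ := List.mem_map.mp hLm
          rw [PySem.Str.len_eq]
          positivity
        exact (exists_slice_iff text x _ (mem_pats_ne cands x hp) hL hpos).mp
          ⟨i, hi, L, hLm, hsl⟩
  exact_mod_cast congrArg Nat.cast hperm.length_eq
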